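-- pv_equiv track=rewrite | github.com/crapas1974/algo2 | basic_approach/recom.py | find_recombination_regions
-- ===== SOURCE A (Python) =====
-- def find_recombination_regions(sequence, pattern, window_size, threshold):
--     recombination_regions = []
--     for i in range(len(sequence) - window_size + 1):
--         window = sequence[i:i + window_size]
--         pattern_count = window.count(pattern)
--         if pattern_count > threshold:
--             recombination_regions.append((i, i + window_size, window))
--     return recombination_regions
-- ===== SOURCE B (Python) =====
-- def find_recombination_regions(sequence, pattern, window_size, threshold):
--     n = len(sequence)
--     m = len(pattern)
--     # nxt[q] = smallest start >= q of an occurrence of pattern in sequence, or n + 1 if none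
--     nxt = [n + 1] * (n + 1)
--     for p in range(n - 1, -1, -1):
--         nxt[p] = p if sequence[p:p + m] == pattern else nxt[p + 1]
--     regions = []
--     for i in range(n - window_size + 1):
--         end = i + window_size
--         cnt = 0
--         p = nxt[i]
--         while p + m <= end:
--             cnt += 1
--             p = nxt[p + m]
--         if cnt > threshold:
--             regions.append((i, end, sequence[i:end]))
--     return regions
-- ===== Notes on version B (the rewrite author's own statement) =====
-- stated objective: alternative
-- what changed: Instead of slicing every window and rescanning it with str.count, B precomputes once a next-occurrence table for the pattern over the whole sequence and counts the non-overlapping hits of each window by jumping from occurrence to occurrence; Pre_ excludes negative window sizes and empty patterns whose window loop actually runs, where A's values are artefacts of str.count('') and Python's negative-slice semantics and B raises or does not terminate.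
-- outside the precondition, e.g. on find_recombination_regions('abc', 'a', -1, 0): A returns [(0, -1, 'ab')], B raises IndexError
import Mathlib
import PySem

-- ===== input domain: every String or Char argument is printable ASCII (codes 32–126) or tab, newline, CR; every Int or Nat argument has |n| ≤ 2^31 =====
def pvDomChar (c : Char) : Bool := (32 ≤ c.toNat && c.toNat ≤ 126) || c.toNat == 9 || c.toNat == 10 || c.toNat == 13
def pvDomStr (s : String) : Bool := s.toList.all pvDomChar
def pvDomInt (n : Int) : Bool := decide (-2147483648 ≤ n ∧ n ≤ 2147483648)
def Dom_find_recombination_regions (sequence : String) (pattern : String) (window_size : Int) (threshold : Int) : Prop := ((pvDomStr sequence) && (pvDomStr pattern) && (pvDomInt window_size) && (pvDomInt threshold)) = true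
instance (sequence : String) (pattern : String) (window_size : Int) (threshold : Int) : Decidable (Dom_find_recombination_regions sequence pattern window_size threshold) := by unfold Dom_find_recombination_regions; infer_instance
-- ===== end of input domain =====

-- B replaces A's per-window slice-and-count with one precomputed next-occurrence table plus
-- an occurrence-to-occurrence jump walk per window (objective: alternative).

-- ===== PORT A =====
def find_recombination_regions (sequence : String) (pattern : String) (window_size : Int) (threshold : Int) : List (Int × Int × String) :=
  (PySem.List.pyRange 0 (PySem.Str.len sequence - window_size + 1) 1).foldl
    (fun acc i =>
      let window := PySem.Str.slice sequence (some i) (some (i + window_size))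
      let pattern_count : Int := PySem.Str.count window pattern
      if pattern_count > threshold then acc ++ [(i, i + window_size, window)] else acc)
    []

-- ===== PORT B =====
-- the 'while p + m <= end' loop of Source B; fuel is only a totality guard (never exhausted
-- inside Pre_: p strictly increases and is bounded); pyGetD's default is never read there
def pvChainB (nxt : List Int) (m e : Int) : Nat → Int → Int → Int
  | 0, _, cnt => cnt
  | fuel + 1, p, cnt =>
      if p + m ≤ e then pvChainB nxt m e fuel (PySem.List.pyGetD nxt (p + m) 0) (cnt + 1)
      else cnt

def find_recombination_regions_alt (sequence : String) (pattern : String) (window_size : Int) (threshold : Int) : List (Int × Int × String) :=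
  let n : Int := PySem.Str.len sequence
  let m : Int := PySem.Str.len pattern
  -- nxt[q] = smallest occurrence start >= q of pattern in sequence, or n + 1 if none
  let nxt : List Int :=
    (PySem.List.pyRange (n - 1) (-1) (-1)).foldl
      (fun acc p =>
        acc.set p.toNat
          (if PySem.Str.slice sequence (some p) (some (p + m)) == pattern
           then p else PySem.List.pyGetD acc (p + 1) 0))
      (List.replicate (n + 1).toNat (n + 1))
  (PySem.List.pyRange 0 (n - window_size + 1) 1).foldl
    (fun acc i =>
      let e := i + window_size
      let cnt : Int := pvChainB nxt m e (n + 2).toNat (PySem.List.pyGetD nxt i 0) 0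
      if cnt > threshold then
        acc ++ [(i, e, PySem.Str.slice sequence (some i) (some e))]
      else acc)
    []

-- ===== PRECONDITION & SPEC =====
-- Pre_ excludes negative window sizes and empty patterns whose window loop actually runs
-- (window_size ≤ len(sequence)): there A's returned values are artefacts of str.count('')
-- and of Python's negative-slice semantics, and B does not return (its jump walk loops
-- forever on an empty pattern; a negative window size runs i past the table, an IndexError).
def Pre_find_recombination_regions (sequence : String) (pattern : String) (window_size : Int) (threshold : Int) : Prop :=
  0 ≤ window_size ∧ (pattern ≠ "" ∨ PySem.Str.len sequence < window_size)
instance (sequence : String) (pattern : String) (window_size : Int) (threshold : Int) : Decidable (Pre_find_recombination_regions sequence pattern window_size threshold) := by unfold Pre_find_recombination_regions; infer_instance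

def pvWitness_find_recombination_regions : String × String × Int × Int := ("abcab", "ab", 3, 0)

def Spec_find_recombination_regions (sequence : String) (pattern : String) (window_size : Int) (threshold : Int) (out : List (Int × Int × String)) : Prop := out = find_recombination_regions_alt sequence pattern window_size threshold
instance (sequence : String) (pattern : String) (window_size : Int) (threshold : Int) (out : List (Int × Int × String)) : Decidable (Spec_find_recombination_regions sequence pattern window_size threshold out) := by unfold Spec_find_recombination_regions; infer_instance

-- ===== CLAIM =====
def Claim_equal_find_recombination_regions : Prop := ∀ (sequence : String) (pattern : String) (window_size : Int) (threshold : Int), Dom_find_recombination_regions sequence pattern window_size threshold → Pre_find_recombination_regions sequence pattern window_size threshold → Spec_find_recombination_regions sequence pattern window_size threshold (find_recombination_regions sequence pattern window_size threshold)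

-- ===== LEMMAS AND PROOFS =====
def pvNo (sl pl : List Char) (q : Nat) : Nat :=
  if h : sl.length < q then sl.length + 1
  else if pl.isPrefixOf (sl.drop q) then q
  else pvNo sl pl (q + 1)
termination_by sl.length + 1 - q
decreasing_by omega

theorem pvNo_ge (sl pl : List Char) (q : Nat) (hq : q ≤ sl.length + 1) : q ≤ pvNo sl pl q := by
  fun_induction pvNo <;> omega

theorem pvNo_of_prefix (sl pl : List Char) (q : Nat) (hq : q ≤ sl.length)
    (h : pl.isPrefixOf (sl.drop q)) : pvNo sl pl q = q := by
  unfold pvNo; rw [dif_neg (by omega), if_pos h]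

theorem pvNo_of_not_prefix (sl pl : List Char) (q : Nat) (hq : q ≤ sl.length)
    (h : ¬ pl.isPrefixOf (sl.drop q)) : pvNo sl pl q = pvNo sl pl (q + 1) := by
  conv_lhs => rw [pvNo]
  rw [dif_neg (by omega), if_neg h]

theorem pvNo_top (sl pl : List Char) (hpl : pl ≠ []) : pvNo sl pl sl.length = sl.length + 1 := by
  rw [pvNo_of_not_prefix sl pl _ le_rfl (by rw [List.drop_length]; simp [List.isPrefixOf_iff_prefix, hpl])]
  unfold pvNo; rw [dif_pos (by omega)]

def pvGcnt (pl : List Char) : List Char → Nat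
  | [] => 0
  | c :: t =>
      if pl.isPrefixOf (c :: t) then pvGcnt pl (t.drop (pl.length - 1)) + 1
      else pvGcnt pl t
termination_by l => l.length
decreasing_by all_goals (simp only [List.length_drop, List.length_cons]; omega)

theorem pvCountGo (pl : List Char) (hpl : pl ≠ []) :
    ∀ (fuel : Nat) (w : List Char) (acc : Nat), w.length ≤ fuel →
      PySem.Chars.count.go pl fuel w acc = acc + pvGcnt pl w := by
  intro fuel
  induction fuel with
  | zero =>
    intro w acc h
    have hw : w = [] := List.length_eq_zero_iff.1 (by omega)
    subst hw; simp [PySem.Chars.count.go, pvGcnt]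
  | succ f ih =>
    intro w acc h
    match w with
    | [] => simp [PySem.Chars.count.go, pvGcnt]
    | c :: t =>
      rw [PySem.Chars.count.go]
      by_cases hp : pl.isPrefixOf (c :: t)
      · rw [if_pos hp]
        have hm : 1 ≤ pl.length := List.length_pos_of_ne_nil hpl
        have hd : List.drop pl.length (c :: t) = t.drop (pl.length - 1) := by
          conv_lhs => rw [show pl.length = (pl.length - 1) + 1 by omega]
          rw [List.drop_succ_cons]
        rw [hd, ih _ _ (by have : (List.drop (pl.length - 1) t).length = t.length - (pl.length - 1) := List.length_drop; simp only [List.length_cons] at h; omega)]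
        rw [pvGcnt, if_pos hp]; omega
      · rw [if_neg hp, ih _ _ (by simp at h; omega)]
        rw [pvGcnt, if_neg hp]

theorem pvCount_eq_gcnt (w pl : List Char) (hpl : pl ≠ []) :
    PySem.Chars.count w pl = pvGcnt pl w := by
  rw [PySem.Chars.count, if_neg (by simp [List.isEmpty_iff, hpl]), pvCountGo pl hpl _ _ _ le_rfl]; omega

def pvMcnt (sl pl : List Char) (b a : Nat) : Nat :=
  if h : pvNo sl pl a + pl.length ≤ b ∧ a < pvNo sl pl a + pl.length then
    pvMcnt sl pl b (pvNo sl pl a + pl.length) + 1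
  else 0
termination_by b - a
decreasing_by omega

theorem pvMain (sl pl : List Char) (hpl : pl ≠ []) :
    ∀ (d a b : Nat), d = b - a → a ≤ sl.length → b ≤ sl.length →
      pvGcnt pl ((sl.drop a).take (b - a)) = pvMcnt sl pl b a := by
  have hm : 1 ≤ pl.length := List.length_pos_of_ne_nil hpl
  intro d
  induction d using Nat.strong_induction_on with
  | _ d ih =>
    intro a b hd ha hb
    by_cases hba : b ≤ a
    · rw [show b - a = 0 by omega]
      rw [pvMcnt]
      have hge := pvNo_ge sl pl a (by omega)
      rw [dif_neg (by omega)]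
      simp [pvGcnt]
    · have han : a < sl.length := by omega
      set w := (sl.drop a).take (b - a) with hw
      have hwlen : w.length = min (b - a) (sl.length - a) := by
        simp [hw]
      have hwne : w ≠ [] := by
        intro hnil; rw [hnil] at hwlen; simp at hwlen; omega
      by_cases hp : pl.isPrefixOf w
      · have hp' : pl <+: w := List.isPrefixOf_iff_prefix.1 hp
        have hp2 : pl <+: sl.drop a ∧ pl.length ≤ b - a := List.prefix_take_iff.1 hp'
        have hno : pvNo sl pl a = a := pvNo_of_prefix sl pl a (by omega)
          (List.isPrefixOf_iff_prefix.2 hp2.1)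
        rw [pvMcnt, hno, dif_pos (by constructor <;> omega)]
        obtain ⟨c, t, hct⟩ := List.exists_cons_of_ne_nil hwne
        rw [hct, pvGcnt, if_pos (hct ▸ hp)]
        have hdrop : t.drop (pl.length - 1) = (sl.drop (a + pl.length)).take (b - (a + pl.length)) := by
          have h1 : t.drop (pl.length - 1) = w.drop pl.length := by
            rw [hct, show pl.length = (pl.length - 1) + 1 by omega, List.drop_succ_cons,
              show pl.length - 1 + 1 - 1 = pl.length - 1 by omega]
          rw [h1, hw, List.drop_take, List.drop_drop,
            show b - a - pl.length = b - (a + pl.length) by omega]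
        rw [hdrop, ih (b - (a + pl.length)) (by omega) (a + pl.length) b rfl (by omega) hb]
      · obtain ⟨c, t, hct⟩ := List.exists_cons_of_ne_nil hwne
        rw [hct, pvGcnt, if_neg (hct ▸ hp)]
        have ht : t = (sl.drop (a + 1)).take (b - (a + 1)) := by
          have : t = w.drop 1 := by rw [hct]; simp
          rw [this, hw, List.drop_take, List.drop_drop,
            show b - a - 1 = b - (a + 1) by omega]
        rw [ht, ih (b - (a + 1)) (by omega) (a + 1) b rfl (by omega) hb]
        by_cases hocc : pl.isPrefixOf (sl.drop a)
        · have hno : pvNo sl pl a = a := pvNo_of_prefix sl pl a (by omega) hocc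
          have hnofit : b < a + pl.length := by
            by_contra hfit
            exact hp (List.isPrefixOf_iff_prefix.2 (List.prefix_take_iff.2
              ⟨List.isPrefixOf_iff_prefix.1 hocc, by omega⟩))
          have h1 : pvMcnt sl pl b a = 0 := by rw [pvMcnt, dif_neg (by rw [hno]; omega)]
          have hge := pvNo_ge sl pl (a + 1) (by omega)
          have h2 : pvMcnt sl pl b (a + 1) = 0 := by rw [pvMcnt, dif_neg (by omega)]
          rw [h1, h2]
        · have hno : pvNo sl pl a = pvNo sl pl (a + 1) := pvNo_of_not_prefix sl pl a (by omega) hocc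
          have hge := pvNo_ge sl pl (a + 1) (by omega)
          have key : pvMcnt sl pl b (a + 1) = pvMcnt sl pl b a := by
            conv_lhs => rw [pvMcnt]
            conv_rhs => rw [pvMcnt]
            rw [hno]
            by_cases hc : pvNo sl pl (a + 1) + pl.length ≤ b
            · rw [dif_pos ⟨hc, by omega⟩, dif_pos ⟨hc, by omega⟩]
            · rw [dif_neg (by omega), dif_neg (by omega)]
          exact key

theorem pvChain_eq (sl pl : List Char) (hpl : pl ≠ []) (b : Nat) (hb : b ≤ sl.length) :
    ∀ (fuel a : Nat) (cnt : Int), a ≤ sl.length → b + 1 - a ≤ fuel →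
      pvChainB ((List.range (sl.length + 1)).map (fun q => (pvNo sl pl q : Int)))
          (pl.length : Int) (b : Int) fuel ((pvNo sl pl a : Int)) cnt
        = cnt + pvMcnt sl pl b a := by
  have hm : 1 ≤ pl.length := List.length_pos_of_ne_nil hpl
  intro fuel
  induction fuel with
  | zero =>
    intro a cnt ha hf
    have hba : b < a := by omega
    have hge := pvNo_ge sl pl a (by omega)
    rw [pvChainB, pvMcnt, dif_neg (by omega)]
    omega
  | succ f ih =>
    intro a cnt ha hf
    have hge := pvNo_ge sl pl a (by omega)
    rw [pvChainB]
    by_cases hc : pvNo sl pl a + pl.length ≤ b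
    · rw [if_pos (by omega)]
      have hidx : ((pvNo sl pl a : Int) + pl.length) = ((pvNo sl pl a + pl.length : Nat) : Int) := by push_cast; ring
      have hlt : pvNo sl pl a + pl.length < sl.length + 1 := by omega
      have hget : PySem.List.pyGetD ((List.range (sl.length + 1)).map (fun q => (pvNo sl pl q : Int)))
          ((pvNo sl pl a : Int) + pl.length) 0 = (pvNo sl pl (pvNo sl pl a + pl.length) : Int) := by
        rw [hidx, PySem.List.pyGetD_natCast]
        rw [List.getD_eq_getElem _ _ (by simpa using hlt)]
        simp
      rw [hget, ih (pvNo sl pl a + pl.length) (cnt + 1) (by omega) (by omega)]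
      conv_rhs => rw [pvMcnt]
      rw [dif_pos ⟨hc, by omega⟩]
      push_cast
      ring
    · rw [if_neg (by omega), pvMcnt, dif_neg (by omega)]
      omega

-- condition of B's table-filling step ↔ pattern occurs at k
theorem pvCond_iff (sequence pattern : String) (k : Nat) (hk : k ≤ sequence.toList.length) :
    ((PySem.Str.slice sequence (some (k : Int)) (some ((k : Int) + (pattern.toList.length : Int))) == pattern) = true)
      ↔ pattern.toList.isPrefixOf (sequence.toList.drop k) = true := by
  set sl := sequence.toList
  set pl := pattern.toList
  have hslice : (PySem.Str.slice sequence (some (k : Int)) (some ((k : Int) + (pl.length : Int)))).toList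
      = (sl.drop k).take pl.length := by
    rw [PySem.Str.slice]
    rw [String.toList_ofList]
    simp only [PySem.Chars.slice_eq_listSlice]
    rw [show ((k : Int) + (pl.length : Int)) = ((k + pl.length : Nat) : Int) by push_cast; ring]
    rw [PySem.List.slice_natCast]
    congr 1
    omega
  constructor
  · intro h
    rw [beq_iff_eq] at h
    have h3 := congrArg String.toList h
    rw [hslice] at h3
    rw [List.isPrefixOf_iff_prefix, List.prefix_iff_eq_take]
    exact h3.symm
  · intro h
    rw [List.isPrefixOf_iff_prefix] at h
    rw [beq_iff_eq]
    have h3 : (PySem.Str.slice sequence (some (k : Int)) (some ((k : Int) + (pl.length : Int)))).toList = pattern.toList := by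
      rw [hslice, ← List.prefix_iff_eq_take.1 h]
    have h4 := congrArg String.ofList h3
    simpa [String.ofList_toList] using h4

-- invariant of B's right-to-left table fill
theorem pvNxtAux (sequence pattern : String) :
    ∀ (k : Nat), k ≤ sequence.toList.length →
      (PySem.List.pyRange ((k : Int) - 1) (-1) (-1)).foldl
          (fun acc p =>
            acc.set p.toNat
              (if PySem.Str.slice sequence (some p) (some (p + (pattern.toList.length : Int))) == pattern
               then p else PySem.List.pyGetD acc (p + 1) 0))
          ((List.range (sequence.toList.length + 1)).map
            (fun q => if k ≤ q then (pvNo sequence.toList pattern.toList q : Int)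
                      else ((sequence.toList.length : Int) + 1)))
        = (List.range (sequence.toList.length + 1)).map
            (fun q => (pvNo sequence.toList pattern.toList q : Int)) := by
  set sl := sequence.toList with hsl
  set pl := pattern.toList with hpldef
  have hsl' : sl.length = sequence.toList.length := rfl
  intro k
  induction k with
  | zero =>
    intro _
    rw [PySem.List.pyRange_neg_one_eq_nil (by omega)]
    simp
  | succ k ih =>
    intro hk
    rw [show ((k + 1 : Nat) : Int) - 1 = (k : Int) by push_cast; ring]
    rw [PySem.List.pyRange_neg_one_cons (by omega)]
    rw [List.foldl_cons]
    have hstep :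
        ((List.range (sl.length + 1)).map
            (fun q => if k + 1 ≤ q then (pvNo sl pl q : Int) else ((sl.length : Int) + 1))).set (k : Int).toNat
          (if PySem.Str.slice sequence (some (k : Int)) (some ((k : Int) + (pl.length : Int))) == pattern
           then (k : Int)
           else PySem.List.pyGetD
             ((List.range (sl.length + 1)).map
               (fun q => if k + 1 ≤ q then (pvNo sl pl q : Int) else ((sl.length : Int) + 1)))
             ((k : Int) + 1) 0)
        = (List.range (sl.length + 1)).map
            (fun q => if k ≤ q then (pvNo sl pl q : Int) else ((sl.length : Int) + 1)) := by
      have hkn : k < sl.length := by omega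
      have hval : (if PySem.Str.slice sequence (some (k : Int)) (some ((k : Int) + (pl.length : Int))) == pattern
           then (k : Int)
           else PySem.List.pyGetD
             ((List.range (sl.length + 1)).map
               (fun q => if k + 1 ≤ q then (pvNo sl pl q : Int) else ((sl.length : Int) + 1)))
             ((k : Int) + 1) 0) = (pvNo sl pl k : Int) := by
        have hget : PySem.List.pyGetD
             ((List.range (sl.length + 1)).map
               (fun q => if k + 1 ≤ q then (pvNo sl pl q : Int) else ((sl.length : Int) + 1)))
             ((k : Int) + 1) 0 = (pvNo sl pl (k + 1) : Int) := by
          rw [show ((k : Int) + 1) = ((k + 1 : Nat) : Int) by push_cast; ring]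
          rw [PySem.List.pyGetD_natCast]
          rw [List.getD_eq_getElem _ _ (by simp; omega)]
          simp
        by_cases hocc : pl.isPrefixOf (sl.drop k) = true
        · rw [if_pos ((pvCond_iff sequence pattern k (by omega)).2 hocc)]
          rw [pvNo_of_prefix sl pl k (by omega) hocc]
        · rw [if_neg (fun hcond => hocc ((pvCond_iff sequence pattern k (by omega)).1 hcond))]
          rw [hget, pvNo_of_not_prefix sl pl k (by omega) hocc]
      rw [hval]
      apply List.ext_getElem
      · simp
      · intro i h1 h2
        simp only [List.length_set, List.length_map, List.length_range] at h1 h2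
        rw [List.getElem_set]
        simp only [List.getElem_map, List.getElem_range]
        split
        · next hik => rw [← hik]; simp [Int.toNat_natCast]
        · next hik =>
          have : (k : Int).toNat = k := by simp
          rw [this] at hik
          by_cases hle : k + 1 ≤ i
          · rw [if_pos hle, if_pos (by omega)]
          · rw [if_neg hle, if_neg (by omega)]
    rw [hstep, ih (by omega)]

theorem pvWindow (sequence : String) (i w : Int) :
    (PySem.Str.slice sequence (some i) (some (i + w))).toList
      = (sequence.toList.drop (PySem.List.clampIdx sequence.toList.length i)).take
          (PySem.List.clampIdx sequence.toList.length (i + w) - PySem.List.clampIdx sequence.toList.length i) := by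
  rw [PySem.Str.slice, String.toList_ofList]
  simp only [PySem.Chars.slice_eq_listSlice]
  rfl

theorem pvClampIdx_nonneg (n : Nat) (x : Int) (hx : 0 ≤ x) :
    PySem.List.clampIdx n x = min x.toNat n := by
  rw [PySem.List.clampIdx, if_neg (by omega)]

theorem pvGetNo (sl pl : List Char) (q : Nat) (hq : q ≤ sl.length) :
    PySem.List.pyGetD ((List.range (sl.length + 1)).map (fun q => (pvNo sl pl q : Int))) ((q : Nat) : Int) 0
      = (pvNo sl pl q : Int) := by
  rw [PySem.List.pyGetD_natCast, List.getD_eq_getElem _ _ (by simp; omega)]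
  simp

-- the per-window count: A's slice-and-count equals B's jump walk
theorem pvPerI (sequence pattern : String) (hpl : pattern.toList ≠ []) (i w : Int)
    (hi : 0 ≤ i) (hw : 0 ≤ w) (hiw : i + w ≤ (sequence.toList.length : Int)) :
    ((PySem.Str.count (PySem.Str.slice sequence (some i) (some (i + w))) pattern : Nat) : Int)
      = pvChainB
          ((List.range (sequence.toList.length + 1)).map (fun q => (pvNo sequence.toList pattern.toList q : Int)))
          (pattern.toList.length : Int) (i + w)
          (((sequence.toList.length : Int)) + 2).toNat
          (PySem.List.pyGetD
            ((List.range (sequence.toList.length + 1)).map (fun q => (pvNo sequence.toList pattern.toList q : Int)))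
            i 0)
          0 := by
  set sl := sequence.toList with hsl
  set pl := pattern.toList with hpldef
  set n := sl.length with hn
  set a0 := i.toNat with ha0
  set b0 := (i + w).toNat with hb0
  have ha0n : a0 ≤ n := by omega
  have hb0n : b0 ≤ n := by omega
  have hia : i = ((a0 : Nat) : Int) := by omega
  have hiwb : i + w = ((b0 : Nat) : Int) := by omega
  have hfuel : (((n : Int)) + 2).toNat = n + 2 := by omega
  rw [hfuel]
  conv_lhs => rw [PySem.Str.count, pvWindow sequence i w]
  rw [← hsl, ← hn, ← hpldef]
  have hca : PySem.List.clampIdx n i = a0 := by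
    rw [pvClampIdx_nonneg n i hi]; omega
  have hcb : PySem.List.clampIdx n (i + w) = b0 := by
    rw [pvClampIdx_nonneg n (i + w) (by omega)]; omega
  rw [hca, hcb, pvCount_eq_gcnt _ _ hpl, pvMain sl pl hpl (b0 - a0) a0 b0 rfl ha0n hb0n]
  conv_rhs => rw [hiwb, hia, pvGetNo sl pl a0 ha0n]
  rw [pvChain_eq sl pl hpl b0 hb0n (n + 2) a0 0 ha0n (by omega)]
  omega

-- the nxt table built by B's fold is exactly pvNo
theorem pvNxt_eq (sequence pattern : String) (hpl : pattern.toList ≠ []) :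
    (PySem.List.pyRange ((sequence.toList.length : Int) - 1) (-1) (-1)).foldl
        (fun acc p =>
          acc.set p.toNat
            (if PySem.Str.slice sequence (some p) (some (p + (pattern.toList.length : Int))) == pattern
             then p else PySem.List.pyGetD acc (p + 1) 0))
        (List.replicate ((sequence.toList.length : Int) + 1).toNat ((sequence.toList.length : Int) + 1))
      = (List.range (sequence.toList.length + 1)).map
          (fun q => (pvNo sequence.toList pattern.toList q : Int)) := by
  set sl := sequence.toList with hsl
  set pl := pattern.toList with hpldef
  have hrep : List.replicate ((sl.length : Int) + 1).toNat ((sl.length : Int) + 1)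
      = (List.range (sl.length + 1)).map
          (fun q => if sl.length ≤ q then (pvNo sl pl q : Int) else ((sl.length : Int) + 1)) := by
    apply List.ext_getElem
    · simp
    · intro idx h1 h2
      simp only [List.length_replicate] at h1
      rw [List.getElem_replicate]
      simp only [List.getElem_map, List.getElem_range]
      simp only [List.length_map, List.length_range] at h2
      by_cases hidx : sl.length ≤ idx
      · rw [if_pos hidx]
        have : idx = sl.length := by omega
        rw [this, pvNo_top sl pl hpl]
        omega
      · rw [if_neg hidx]
  rw [show ((sl.length : Int) - 1) = ((sl.length : Nat) : Int) - 1 by norm_num]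
  rw [hrep]
  exact pvNxtAux sequence pattern sl.length le_rfl

-- Str.len-form restatements (definitionally equal; matched syntactically in the final proof)
theorem pvNxt_eq' (sequence pattern : String) (hpl : pattern.toList ≠ []) :
    (PySem.List.pyRange (PySem.Str.len sequence - 1) (-1) (-1)).foldl
        (fun acc p =>
          acc.set p.toNat
            (if PySem.Str.slice sequence (some p) (some (p + PySem.Str.len pattern)) == pattern
             then p else PySem.List.pyGetD acc (p + 1) 0))
        (List.replicate (PySem.Str.len sequence + 1).toNat (PySem.Str.len sequence + 1))
      = (List.range (sequence.toList.length + 1)).map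
          (fun q => (pvNo sequence.toList pattern.toList q : Int)) :=
  pvNxt_eq sequence pattern hpl

theorem pvPerI' (sequence pattern : String) (hpl : pattern.toList ≠ []) (i w : Int)
    (hi : 0 ≤ i) (hw : 0 ≤ w) (hiw : i + w ≤ PySem.Str.len sequence) :
    ((PySem.Str.count (PySem.Str.slice sequence (some i) (some (i + w))) pattern : Nat) : Int)
      = pvChainB
          ((List.range (sequence.toList.length + 1)).map (fun q => (pvNo sequence.toList pattern.toList q : Int)))
          (PySem.Str.len pattern) (i + w)
          (PySem.Str.len sequence + 2).toNat
          (PySem.List.pyGetD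
            ((List.range (sequence.toList.length + 1)).map (fun q => (pvNo sequence.toList pattern.toList q : Int)))
            i 0)
          0 :=
  pvPerI sequence pattern hpl i w hi hw hiw

-- ===== VERDICT (by name: the statement is the Claim_ definition above) =====
theorem find_recombination_regions_spec : Claim_equal_find_recombination_regions := by
  intro sequence pattern window_size threshold _ hpre
  obtain ⟨hw, hd⟩ := hpre
  show find_recombination_regions sequence pattern window_size threshold
      = find_recombination_regions_alt sequence pattern window_size threshold
  by_cases hpl0 : pattern.toList = []
  · -- the window loop of both programs is empty: Pre_ forces len(sequence) < window_size here
    have hpe : pattern = "" := by have h4 := congrArg String.ofList hpl0; simpa using h4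
    have hnw : PySem.Str.len sequence < window_size := hd.resolve_left (by simp [hpe])
    simp only [find_recombination_regions, find_recombination_regions_alt]
    rw [PySem.List.pyRange_one 0 (PySem.Str.len sequence - window_size + 1),
      show (PySem.Str.len sequence - window_size + 1 - 0).toNat = 0 by omega]
    simp
  · have hpl : pattern.toList ≠ [] := hpl0
    simp only [find_recombination_regions, find_recombination_regions_alt]
    rw [pvNxt_eq' sequence pattern hpl]
    rw [PySem.List.foldl_append_ite, PySem.List.foldl_append_ite]
    refine congrArg (List.map _) (List.filter_congr ?_)
    intro i hi
    have hi' := PySem.List.mem_pyRange_one.1 hi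
    have hlen : PySem.Str.len sequence = (sequence.toList.length : Int) := rfl
    simp only [decide_eq_decide]
    rw [pvPerI' sequence pattern hpl i window_size hi'.1 hw (by rw [hlen] at hi' ⊢; omega)]
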